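-- pv_equiv track=rewrite | github.com/sueszli/vector-database-benchmark | dataset/python-mutated/breaking_bad.py | match_symbol_1
-- ===== SOURCE A (Python) =====
-- def match_symbol_1(words, symbols):
--     if False:
--         while True:
--             i = 10
--     res = []
--     symbols = sorted(symbols, key=lambda _: len(_), reverse=True)
--     for word in words:
--         for symbol in symbols:
--             word_replaced = ''
--             if word.find(symbol) != -1:
--                 word_replaced = word.replace(symbol, '[' + symbol + ']')
--                 res.append(word_replaced)
--                 break
--         if word_replaced == '':
--             res.append(word)
--     return res
-- ===== SOURCE B (Python) =====
-- def match_symbol_1(words, symbols):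
--     res = []
--     for word in words:
--         best = None
--         for s in symbols:
--             if s in word and (best is None or len(best) < len(s)):
--                 best = s
--         res.append(word if best is None else word.replace(best, '[' + best + ']'))
--     return res
-- ===== Notes on version B (the rewrite author's own statement) =====
-- stated objective: simpler
-- what changed: B drops the length-descending sort and the break-out inner scan: one plain pass per word keeps the longest contained symbol seen so far (strict '>' preserves A's earliest-original-index tie-break), then brackets it. (Pre_ excludes only symbols==[] with words non-empty, where A raises NameError).
import Mathlib
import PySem

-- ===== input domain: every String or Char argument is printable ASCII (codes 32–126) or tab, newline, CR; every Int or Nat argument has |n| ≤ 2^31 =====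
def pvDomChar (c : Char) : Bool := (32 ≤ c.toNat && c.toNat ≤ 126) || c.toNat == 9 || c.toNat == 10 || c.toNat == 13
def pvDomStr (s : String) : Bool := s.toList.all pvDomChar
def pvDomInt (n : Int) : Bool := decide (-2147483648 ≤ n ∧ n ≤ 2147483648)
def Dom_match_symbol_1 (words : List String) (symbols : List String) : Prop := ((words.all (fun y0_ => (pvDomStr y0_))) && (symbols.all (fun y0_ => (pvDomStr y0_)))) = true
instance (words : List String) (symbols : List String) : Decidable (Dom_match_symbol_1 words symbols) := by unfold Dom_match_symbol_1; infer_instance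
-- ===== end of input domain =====

-- B drops A's length-descending sort and break-out inner scan: one plain pass per word keeps the
-- longest contained symbol (strict '<' preserves A's earliest-original-index tie-break).
-- A raises NameError when symbols == [] and words ≠ []; those inputs are outside Pre_.

-- ===== PORT A =====
-- inner 'for symbol in symbols: ... break' loop: first symbol found in word, returning the replaced word
def matchInnerA (word : String) : List String → Option String
  | [] => none
  | s :: rest =>
    if PySem.Str.find word s ≠ -1 then
      some (PySem.Str.replace word s ("[" ++ s ++ "]"))
    else matchInnerA word rest

def match_symbol_1 (words : List String) (symbols : List String) : List String :=
  let symbols' := PySem.List.sorted symbols (fun s => PySem.Str.len s) true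
  words.foldl (fun res word =>
    match matchInnerA word symbols' with
    | some wr => res ++ [wr]
    | none => res ++ [word]) []

-- ===== PORT B =====
-- inner loop of B: keep the longest contained symbol seen so far (strict '<': first wins ties)
def bestSym (word : String) (symbols : List String) : Option String :=
  symbols.foldl (fun best s =>
    if PySem.Str.isIn s word &&
       (match best with
        | none => true
        | some b => decide (PySem.Str.len b < PySem.Str.len s)) then some s else best) none

def match_symbol_1_alt (words : List String) (symbols : List String) : List String :=
  words.foldl (fun res word =>
    res ++ [match bestSym word symbols with
            | none => word
            | some b => PySem.Str.replace word b ("[" ++ b ++ "]")]) []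

-- ===== PRECONDITION & SPEC =====
-- Pre_ excludes exactly the inputs on which Python A raises NameError (word_replaced unassigned):
-- an empty symbols list together with a non-empty words list.
def Pre_match_symbol_1 (words : List String) (symbols : List String) : Prop :=
  symbols ≠ [] ∨ words = []
instance (words : List String) (symbols : List String) : Decidable (Pre_match_symbol_1 words symbols) := by unfold Pre_match_symbol_1; infer_instance

def pvWitness_match_symbol_1 : List String × List String := (["foo+bar", "baz"], ["+", "ba"])

def Spec_match_symbol_1 (words : List String) (symbols : List String) (out : List String) : Prop := out = match_symbol_1_alt words symbols
instance (words : List String) (symbols : List String) (out : List String) : Decidable (Spec_match_symbol_1 words symbols out) := by unfold Spec_match_symbol_1; infer_instance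

-- ===== CLAIM (what is proved, stated in full; the proofs are below) =====
def Claim_equal_match_symbol_1 : Prop := ∀ (words : List String) (symbols : List String), Dom_match_symbol_1 words symbols → Pre_match_symbol_1 words symbols → Spec_match_symbol_1 words symbols (match_symbol_1 words symbols)

-- ===== LEMMAS AND PROOFS =====

-- first symbol of l contained in word (the symbol itself, not the replaced word)
def firstIn (word : String) : List String → Option String
  | [] => none
  | s :: rest => if PySem.Str.isIn s word then some s else firstIn word rest

-- one step of B's fold
def stepB (word : String) (best : Option String) (s : String) : Option String :=
  if PySem.Str.isIn s word &&
     (match best with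
      | none => true
      | some b => decide (PySem.Str.len b < PySem.Str.len s)) then some s else best

lemma matchInnerA_eq_firstIn (word : String) (l : List String) :
    matchInnerA word l = (firstIn word l).map (fun s => PySem.Str.replace word s ("[" ++ s ++ "]")) := by
  induction l with
  | nil => rfl
  | cons s rest ih =>
    simp only [matchInnerA, firstIn]
    have : (PySem.Str.find word s ≠ -1) ↔ (PySem.Str.isIn s word = true) := by
      rw [PySem.Str.find_ne_neg_one_iff, PySem.Str.isIn_iff_infix]
    by_cases h : PySem.Str.isIn s word = true
    · rw [if_pos (this.mpr h), if_pos h]; rfl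
    · rw [if_neg (fun hf => h (this.mp hf)), if_neg h, ih]

abbrev descLen (l : List String) : Prop :=
  l.Pairwise (fun a b => PySem.Str.len b ≤ PySem.Str.len a)

lemma firstIn_nil (word : String) : firstIn word [] = none := rfl

lemma firstIn_cons (word z : String) (zs : List String) :
    firstIn word (z :: zs) = if PySem.Str.isIn z word = true then some z else firstIn word zs := rfl

lemma stepB_none (word s : String) :
    stepB word none s = if PySem.Str.isIn s word = true then some s else none := by
  unfold stepB
  by_cases h : PySem.Str.isIn s word = true
  · rw [if_pos h, h]; rfl
  · rw [if_neg h]; rw [Bool.not_eq_true] at h; rw [h]; rfl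

lemma stepB_some (word s b : String) :
    stepB word (some b) s =
      if (PySem.Str.isIn s word && decide (PySem.Str.len b < PySem.Str.len s)) = true
      then some s else some b := rfl

lemma firstIn_some_mem (word : String) (l : List String) (r : String)
    (h : firstIn word l = some r) : r ∈ l := by
  induction l with
  | nil => exact absurd h (by simp [firstIn])
  | cons z zs ih =>
    rw [firstIn_cons] at h
    by_cases hz : PySem.Str.isIn z word = true
    · rw [if_pos hz] at h
      cases h
      exact List.mem_cons_self
    · rw [if_neg hz] at h
      exact List.mem_cons_of_mem _ (ih h)

lemma insertBy_preserves_desc (s : String) (l : List String) (h : descLen l) :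
    descLen (PySem.List.insertBy (fun a b => decide (PySem.Str.len b < PySem.Str.len a)) s l) := by
  induction l with
  | nil => simp [PySem.List.insertBy, descLen]
  | cons y ys ih =>
    rcases List.pairwise_cons.mp h with ⟨hy, hys⟩
    simp only [PySem.List.insertBy]
    by_cases hb : PySem.Str.len y < PySem.Str.len s
    · rw [if_pos (by simpa using hb)]
      refine List.pairwise_cons.mpr ⟨?_, h⟩
      intro b hb'
      rcases List.mem_cons.mp hb' with rfl | hmem
      · omega
      · have := hy b hmem; omega
    · rw [if_neg (by simpa using hb)]
      refine List.pairwise_cons.mpr ⟨?_, ih hys⟩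
      intro b hb'
      rcases (PySem.List.mem_insertBy _ _ _ _).mp hb' with rfl | hmem
      · omega
      · exact hy b hmem

lemma firstIn_insertBy (word s : String) (l : List String) (h : descLen l) :
    firstIn word (PySem.List.insertBy (fun a b => decide (PySem.Str.len b < PySem.Str.len a)) s l)
      = stepB word (firstIn word l) s := by
  induction l with
  | nil =>
    simp only [PySem.List.insertBy]
    rw [firstIn_cons, firstIn_nil, stepB_none]
  | cons y ys ih =>
    rcases List.pairwise_cons.mp h with ⟨hy, hys⟩
    simp only [PySem.List.insertBy]
    by_cases hb : PySem.Str.len y < PySem.Str.len s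
    · rw [if_pos (by simpa using hb)]
      rw [firstIn_cons]
      by_cases hin : PySem.Str.isIn s word = true
      · rw [if_pos hin]
        rw [firstIn_cons]
        by_cases hyin : PySem.Str.isIn y word = true
        · rw [if_pos hyin, stepB_some, if_pos]
          rw [hin, Bool.true_and]
          exact decide_eq_true hb
        · rw [if_neg hyin]
          cases hfi : firstIn word ys with
          | none => rw [stepB_none, if_pos hin]
          | some r =>
            have hr : r ∈ ys := firstIn_some_mem word ys r hfi
            have hlen : PySem.Str.len r < PySem.Str.len s := by have := hy r hr; omega
            rw [stepB_some, if_pos]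
            rw [hin, Bool.true_and]
            exact decide_eq_true hlen
      · rw [if_neg hin]
        have hstep : stepB word (firstIn word (y :: ys)) s = firstIn word (y :: ys) := by
          cases hfi : firstIn word (y :: ys) with
          | none => rw [stepB_none, if_neg hin]
          | some r =>
            rw [stepB_some, if_neg]
            rw [Bool.not_eq_true] at hin
            rw [hin, Bool.false_and]
            exact Bool.false_ne_true
        exact hstep.symm
    · rw [if_neg (by simpa using hb)]
      rw [firstIn_cons, firstIn_cons]
      by_cases hyin : PySem.Str.isIn y word = true
      · rw [if_pos hyin, if_pos hyin, stepB_some, if_neg]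
        rw [decide_eq_false hb, Bool.and_false]
        exact Bool.false_ne_true
      · rw [if_neg hyin, if_neg hyin]
        exact ih hys

lemma firstIn_foldl (word : String) (syms : List String) (acc : List String) (h : descLen acc) :
    firstIn word (syms.foldl (fun a x => PySem.List.insertBy (fun a b => decide (PySem.Str.len b < PySem.Str.len a)) x a) acc)
      = syms.foldl (stepB word) (firstIn word acc) := by
  induction syms generalizing acc with
  | nil => rfl
  | cons s rest ih =>
    simp only [List.foldl_cons]
    rw [ih _ (insertBy_preserves_desc s acc h), firstIn_insertBy word s acc h]

lemma firstIn_sorted_eq_best (word : String) (symbols : List String) :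
    firstIn word (PySem.List.sorted symbols (fun s => PySem.Str.len s) true) = bestSym word symbols := by
  rw [PySem.List.sorted_rev_eq_foldl_insertBy]
  rw [firstIn_foldl word symbols [] (by simp [descLen])]
  rfl

lemma perword_eq (word : String) (symbols : List String) :
    (match matchInnerA word (PySem.List.sorted symbols (fun s => PySem.Str.len s) true) with
     | some wr => wr | none => word)
    = (match bestSym word symbols with
       | none => word | some b => PySem.Str.replace word b ("[" ++ b ++ "]")) := by
  rw [matchInnerA_eq_firstIn, firstIn_sorted_eq_best]
  cases bestSym word symbols <;> rfl

lemma foldl_both (words symbols : List String) (acc : List String) :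
    words.foldl (fun res word =>
      match matchInnerA word (PySem.List.sorted symbols (fun s => PySem.Str.len s) true) with
      | some wr => res ++ [wr]
      | none => res ++ [word]) acc
    = words.foldl (fun res word =>
        res ++ [match bestSym word symbols with
                | none => word
                | some b => PySem.Str.replace word b ("[" ++ b ++ "]")]) acc := by
  induction words generalizing acc with
  | nil => rfl
  | cons w ws ih =>
    simp only [List.foldl_cons]
    have := perword_eq w symbols
    cases hA : matchInnerA w (PySem.List.sorted symbols (fun s => PySem.Str.len s) true) with
    | none => rw [hA] at this; rw [← this]; exact ih _
    | some wr => rw [hA] at this; rw [← this]; exact ih _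

-- ===== VERDICT (by name: the statement is the Claim_ definition above) =====
theorem match_symbol_1_spec : Claim_equal_match_symbol_1 := by
  intro words symbols _ _
  unfold Spec_match_symbol_1 match_symbol_1 match_symbol_1_alt
  exact foldl_both words symbols []
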